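-- pv_equiv track=rewrite | github.com/GT-RIPL/MultiAgentPerception | ptsemseg/loader/airsim_loader.py | convert_link_label
-- ===== SOURCE A (Python) =====
-- def convert_link_label(link_label):
--     div_list = []
--     for i in link_label:
--         div_list.append(int(i/2))
--
--     new_link_label = []
--     for i, elem_i in enumerate(div_list):
--         for j, elem_j in enumerate(div_list):
--             if j != i and elem_i == elem_j:
--                 new_link_label.append(j)
--     new_link_label = tuple(new_link_label)
--     return new_link_label
-- ===== SOURCE B (Python) =====
-- def convert_link_label(link_label):
--     divs = [int(v / 2) for v in link_label]
--     groups = {}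
--     for j, d in enumerate(divs):
--         groups.setdefault(d, []).append(j)
--     out = []
--     for i, d in enumerate(divs):
--         for j in groups[d]:
--             if j != i:
--                 out.append(j)
--     return tuple(out)
-- ===== Notes on version B (the rewrite author's own statement) =====
-- stated objective: faster
-- what changed: Replaces the O(n^2) nested scan over all index pairs with a dict grouping indices by halved value built in one pass, then emits each index's group members (already in index order) excluding itself.
import Mathlib
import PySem

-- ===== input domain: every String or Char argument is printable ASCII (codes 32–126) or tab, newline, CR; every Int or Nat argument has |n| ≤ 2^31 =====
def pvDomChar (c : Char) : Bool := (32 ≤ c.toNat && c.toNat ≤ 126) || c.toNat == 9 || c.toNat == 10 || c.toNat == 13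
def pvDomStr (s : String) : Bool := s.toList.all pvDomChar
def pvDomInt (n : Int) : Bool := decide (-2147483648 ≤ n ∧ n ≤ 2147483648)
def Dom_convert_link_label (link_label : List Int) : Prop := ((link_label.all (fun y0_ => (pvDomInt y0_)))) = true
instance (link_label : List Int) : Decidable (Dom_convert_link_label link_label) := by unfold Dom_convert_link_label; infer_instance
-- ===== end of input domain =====

-- B replaces A's O(n^2) all-pairs scan with a one-pass dict grouping indices by halved value; objective: faster.
-- ===== PORT A =====
-- int(i/2) truncates toward zero; exact on |i| ≤ 2^31, ported as Int.tdiv (T-division)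
def convert_link_label (link_label : List Int) : List Int :=
  let div_list := link_label.foldl (fun acc i => acc ++ [Int.tdiv i 2]) []
  let new_link_label :=
    (PySem.List.enumerate div_list).foldl (fun new p =>
      (PySem.List.enumerate div_list).foldl (fun new q =>
        if q.1 != p.1 && p.2 == q.2 then new ++ [q.1] else new) new) []
  new_link_label

-- ===== PORT B =====
def convert_link_label_alt (link_label : List Int) : List Int :=
  let divs := link_label.map (fun v => Int.tdiv v 2)
  let groups := (PySem.List.enumerate divs).foldl
    (fun (g : PySem.Dict Int (List Int)) p => g.modify p.2 [] (· ++ [p.1])) PySem.Dict.empty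
  -- groups[d] in Source B: the key is always present, so getD with [] is exact
  (PySem.List.enumerate divs).foldl (fun out p =>
    (groups.getD p.2 []).foldl (fun out j => if j != p.1 then out ++ [j] else out) out) []

-- ===== PRECONDITION & SPEC =====
def Spec_convert_link_label (link_label : List Int) (out : List Int) : Prop := out = convert_link_label_alt link_label
instance (link_label : List Int) (out : List Int) : Decidable (Spec_convert_link_label link_label out) := by unfold Spec_convert_link_label; infer_instance

-- ===== CLAIM (what is proved, stated in full; the proofs are below) =====
def Claim_equal_convert_link_label : Prop := ∀ (link_label : List Int), Dom_convert_link_label link_label → Spec_convert_link_label link_label (convert_link_label link_label)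

-- ===== LEMMAS AND PROOFS =====

-- A's div_list built by append-fold is just the map
theorem pv_divlist_eq (l : List Int) :
    l.foldl (fun acc i => acc ++ [Int.tdiv i 2]) [] = l.map (fun v => Int.tdiv v 2) := by
  simpa using PySem.List.foldl_append_singleton_eq_map (f := fun v => Int.tdiv v 2) (l := l) (acc := [])

-- B's groups dict: lookup of c yields the indices whose halved value is c, in order
theorem pv_groups_getD (l : List (Int × Int)) (c : Int) :
    ((l.foldl (fun (g : PySem.Dict Int (List Int)) p => g.modify p.2 [] (· ++ [p.1]))
        PySem.Dict.empty).getD c []) =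
      (l.filter (fun q => q.2 == c)).map (·.1) := by
  have h := PySem.Dict.getD_foldl_modify_append (l := l.map Prod.swap)
      (d := (PySem.Dict.empty : PySem.Dict Int (List Int))) (c := c)
  rw [List.foldl_map] at h
  simpa [Prod.swap, List.filter_map, Function.comp] using h

-- the per-element contributions of the two programs coincide
theorem pv_pointwise (l : List (Int × Int)) (p : Int × Int) :
    ((l.filter (fun q => q.2 == p.2)).map (·.1)).filter (fun j => j != p.1) =
      (l.filter (fun q => q.1 != p.1 && p.2 == q.2)).map (·.1) := by
  rw [List.filter_map, List.filter_filter]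
  congr 1
  apply List.filter_congr
  intro q _
  simp only [Function.comp]
  congr 1
  simp [eq_comm]

-- ===== VERDICT (by name: the statement is the Claim_ definition above) =====
theorem convert_link_label_spec : Claim_equal_convert_link_label := by
  intro l _
  unfold Spec_convert_link_label convert_link_label convert_link_label_alt
  rw [pv_divlist_eq]
  set divs := l.map (fun v => Int.tdiv v 2) with hdivs
  set e := PySem.List.enumerate divs with he
  -- rewrite both double loops as flatMaps
  have hA : e.foldl (fun new p =>
        e.foldl (fun new q => if q.1 != p.1 && p.2 == q.2 then new ++ [q.1] else new) new) []
      = e.flatMap (fun p => (e.filter (fun q => q.1 != p.1 && p.2 == q.2)).map (·.1)) := by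
    have := PySem.List.foldl_append_eq_flatMap
      (g := fun p => (e.filter (fun q => q.1 != p.1 && p.2 == q.2)).map (·.1))
      (l := e) (acc := ([] : List Int))
    rw [List.nil_append] at this
    rw [← this]
    apply PySem.List.foldl_congr_mem
    intro acc p _
    simpa using PySem.List.foldl_append_if
      (p := fun q => q.1 != p.1 && p.2 == q.2) (f := (·.1)) (l := e) (acc := acc)
  have hB : e.foldl (fun out p =>
        ((e.foldl (fun (g : PySem.Dict Int (List Int)) p => g.modify p.2 [] (· ++ [p.1]))
            PySem.Dict.empty).getD p.2 []).foldl
          (fun out j => if j != p.1 then out ++ [j] else out) out) []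
      = e.flatMap (fun p => ((e.filter (fun q => q.2 == p.2)).map (·.1)).filter (fun j => j != p.1)) := by
    have := PySem.List.foldl_append_eq_flatMap
      (g := fun p => ((e.filter (fun q => q.2 == p.2)).map (·.1)).filter (fun j => j != p.1))
      (l := e) (acc := ([] : List Int))
    rw [List.nil_append] at this
    rw [← this]
    apply PySem.List.foldl_congr_mem
    intro acc p _
    rw [pv_groups_getD]
    simpa using PySem.List.foldl_append_if_eq_filter
      (p := fun j => j != p.1) (l := (e.filter (fun q => q.2 == p.2)).map (·.1)) (acc := acc)
  simp only []
  rw [hA, hB]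
  apply List.flatMap_congr  -- may not exist; fallback below
  intro p _
  exact (pv_pointwise e p).symm
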